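-- pv_equiv track=rewrite | github.com/rlagusgh0223/Algorithm | 230101/17140, 이차원 배열과 연산.py | sort_row
-- ===== SOURCE A (Python) =====
-- def sort_row(row):
--     counter = dict()  # 원소의 개수를 세는 카운터
--     for x in row:
--         if x == 0:  # 0은 무시
--             continue
--         if x not in counter:
--             counter[x] = 1
--         else:
--             counter[x] += 1
--     # 정렬 기준 : 1. 수의 등장 횟수가 커지는 순, 2. 수가 커지는 순
--     sorted_counter = sorted(counter.items(), key=lambda x:(x[1], x[0]))
--     # 정렬된 결과를 배열에 넣을 때는 (수, 등장 횟수)를 넣기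
--     result = []
--     for val, cnt in sorted_counter:
--         result += [val, cnt]
--     return result
-- ===== SOURCE B (Python) =====
-- def sort_row(row):
--     # Count by sorting the nonzero elements and scanning consecutive runs,
--     # instead of a dict-membership counting loop.
--     nz = sorted(x for x in row if x != 0)
--     pairs = []
--     i = 0
--     while i < len(nz):
--         j = i
--         while j < len(nz) and nz[j] == nz[i]:
--             j += 1
--         pairs.append((nz[i], j - i))
--         i = j
--     pairs.sort(key=lambda p: (p[1], p[0]))
--     return [v for p in pairs for v in p]
-- ===== Notes on version B (the rewrite author's own statement) =====
-- stated objective: alternative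
-- what changed: Replaces the dict-membership counting loop with sort-then-scan: nonzero elements are sorted, consecutive equal runs are grouped into (value,count) pairs by an index scan, and the pairs are sorted by (count,value) and flattened.
import Mathlib
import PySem

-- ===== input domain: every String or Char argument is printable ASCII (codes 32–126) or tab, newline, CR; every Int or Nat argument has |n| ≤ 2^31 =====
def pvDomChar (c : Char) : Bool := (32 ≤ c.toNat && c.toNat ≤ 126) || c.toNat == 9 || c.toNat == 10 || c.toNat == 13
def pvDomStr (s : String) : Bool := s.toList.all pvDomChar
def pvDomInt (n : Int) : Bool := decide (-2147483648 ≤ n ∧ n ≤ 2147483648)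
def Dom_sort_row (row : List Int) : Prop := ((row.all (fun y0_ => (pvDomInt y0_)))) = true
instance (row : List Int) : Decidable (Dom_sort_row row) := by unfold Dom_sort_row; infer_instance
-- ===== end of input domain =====

-- B counts by sorting the nonzero elements and grouping consecutive runs instead of A's
-- dict-membership counting loop; same result, alternative algorithm (no speed claim).

-- ===== PORT A =====
-- counter loop: if x == 0: continue; if x not in counter: counter[x] = 1 else counter[x] += 1
-- (counter[x] += 1 only runs when x is present, so getD 0 reads exactly counter[x])
def sort_row (row : List Int) : List Int :=
  (PySem.List.sorted2
    (row.foldl (fun d x =>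
      if x == 0 then d
      else if !d.contains x then d.insert x 1
      else d.insert x (d.getD x 0 + 1)) PySem.Dict.empty).items
    (fun p => p.2) (fun p => p.1)).foldl (fun r p => r ++ [p.1, p.2]) []

-- ===== PORT B =====
-- the inner 'while j < len(nz) and nz[j] == nz[i]' index scan over the run starting at i,
-- transcribed as takeWhile/dropWhile on the suffix (exact: same run, same remainder)
def sortRowRuns : List Int → List (Int × Int)
  | [] => []
  | v :: t =>
      (v, 1 + (t.takeWhile (fun y => y == v)).length) :: sortRowRuns (t.dropWhile (fun y => y == v))
  termination_by s => s.length
  decreasing_by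
    have := List.length_dropWhile_le (fun y => y == v) t
    simp
    omega

def sort_row_alt (row : List Int) : List Int :=
  (PySem.List.sorted2
    (sortRowRuns (PySem.List.sorted (row.filter (fun x => !(x == 0))) (fun x => x)))
    (fun p => p.2) (fun p => p.1)).flatMap (fun p => [p.1, p.2])

-- ===== PRECONDITION & SPEC =====
def Spec_sort_row (row : List Int) (out : List Int) : Prop := out = sort_row_alt row
instance (row : List Int) (out : List Int) : Decidable (Spec_sort_row row out) := by unfold Spec_sort_row; infer_instance

-- ===== CLAIM (what is proved, stated in full; the proofs are below) =====
def Claim_equal_sort_row : Prop := ∀ (row : List Int), Dom_sort_row row → Spec_sort_row row (sort_row row)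

-- ===== LEMMAS AND PROOFS =====

-- A's counting loop is collections.Counter of the nonzero elements
theorem sortRow_counter_eq (row : List Int) (d : PySem.Dict Int Int) :
    row.foldl (fun d x =>
      if x == 0 then d
      else if !d.contains x then d.insert x 1
      else d.insert x (d.getD x 0 + 1)) d
    = (row.filter (fun x => !(x == 0))).foldl (fun d x => d.insert x (d.getD x 0 + 1)) d := by
  induction row generalizing d with
  | nil => rfl
  | cons x t ih =>
    rw [List.foldl_cons, List.filter_cons]
    by_cases hx : x = (0 : Int)
    · rw [if_pos (by simp [hx] : (x == (0 : Int)) = true),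
          if_neg (by simp [hx] : ¬((!(x == (0 : Int))) = true))]
      exact ih d
    · rw [if_neg (by simp [hx] : ¬((x == (0 : Int)) = true)),
          if_pos (by simp [hx] : (!(x == (0 : Int))) = true), List.foldl_cons]
      by_cases hc : d.contains x
      · rw [if_neg (by simp [hc] : ¬((!d.contains x) = true))]
        exact ih _
      · have hcf : d.contains x = false := by simpa using hc
        rw [if_pos (by simp [hcf] : (!d.contains x) = true)]
        have : d.getD x 0 + 1 = 1 := by
          rw [PySem.Dict.getD_of_not_contains (h := hcf)]
          norm_num
        rw [this]
        exact ih _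

-- sorted2 with keys (p.2, p.1) is sorted with the lexicographic key toLex (p.2, p.1)
theorem sorted2_eq_sorted_lex (xs : List (Int × Int)) :
    PySem.List.sorted2 xs (fun p => p.2) (fun p => p.1)
    = PySem.List.sorted xs (fun p => toLex (p.2, p.1)) := by
  have hb : (fun (a b : Int × Int) =>
        (decide (a.2 < b.2) || (!decide (b.2 < a.2) && decide (a.1 < b.1))))
      = (fun (a b : Int × Int) => decide (toLex (a.2, a.1) < toLex (b.2, b.1))) := by
    funext a b
    by_cases h1 : a.2 < b.2 <;> by_cases h2 : b.2 < a.2 <;>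
      simp [h1, h2, Prod.Lex.lt_iff] <;> omega
  show xs.foldl (fun acc x => PySem.List.insertBy
      (fun a b => (decide (a.2 < b.2) || (!decide (b.2 < a.2) && decide (a.1 < b.1)))) x acc) []
    = xs.foldl (fun acc x => PySem.List.insertBy
      (fun a b => decide (toLex (a.2, a.1) < toLex (b.2, b.1))) x acc) []
  rw [hb]

-- run-length scan of a ≤-sorted list is (value, multiplicity) over the distinct values
theorem sortRowRuns_perm (s : List Int) (h : s.Pairwise (· ≤ ·)) :
    (sortRowRuns s).Perm
      ((PySem.Set.ofList s : List Int).map (fun k => (k, (List.count k s : Int)))) := by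
  fun_induction sortRowRuns s with
  | case1 => simp [PySem.Set.ofList]
  | case2 v t ih =>
    have hv : ∀ y ∈ t, v ≤ y := (List.pairwise_cons.1 h).1
    have ht : t.Pairwise (· ≤ ·) := (List.pairwise_cons.1 h).2
    set p : Int → Bool := fun y => y == v with hp
    have hsplit : t.takeWhile p ++ t.dropWhile p = t := List.takeWhile_append_dropWhile
    have hall : ∀ y ∈ t.takeWhile p, y = v := by
      intro y hy
      have := List.mem_takeWhile_imp hy
      simpa [hp] using this
    have ht2 : (t.dropWhile p).Pairwise (· ≤ ·) :=
      ht.sublist (List.dropWhile_sublist p)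
    have hlt : ∀ y ∈ t.dropWhile p, v < y := by
      intro y hy
      cases e : t.dropWhile p with
      | nil => rw [e] at hy; cases hy
      | cons b r =>
        have hne : t.dropWhile p ≠ [] := by rw [e]; simp
        have hbp : p ((t.dropWhile p).head hne) = false := List.head_dropWhile_not p hne
        have hhead : (t.dropWhile p).head hne = b := by simp [e]
        have hbv : b ≠ v := by
          rw [hhead] at hbp; simpa [hp] using hbp
        have hbt : b ∈ t := (List.dropWhile_sublist p).mem (by rw [e]; simp)
        have hvb : v < b := lt_of_le_of_ne (hv b hbt) (Ne.symm hbv)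
        rw [e] at hy
        rcases List.mem_cons.1 hy with rfl | hyr
        · exact hvb
        · have : b ≤ y := by
            rw [e] at ht2
            exact (List.pairwise_cons.1 ht2).1 y hyr
          exact lt_of_lt_of_le hvb this
    have hvnot : v ∉ t.dropWhile p := fun hmem => lt_irrefl v (hlt v hmem)
    -- count bookkeeping
    have hcnt1 : List.count v (t.takeWhile p) = (t.takeWhile p).length :=
      List.count_eq_length.2 (fun b hb => (hall b hb).symm)
    have hcnt2 : List.count v (t.dropWhile p) = 0 := List.count_eq_zero.2 hvnot
    have hsplitc : ∀ k : Int, List.count k t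
        = List.count k (t.takeWhile p) + List.count k (t.dropWhile p) := by
      intro k; rw [← List.count_append, hsplit]
    have hcv : List.count v (v :: t) = 1 + (t.takeWhile p).length := by
      have h0 : List.count v (v :: t) = List.count v t + 1 := by simp
      have := hsplitc v
      omega
    have hck : ∀ k ∈ t.dropWhile p, List.count k (v :: t) = List.count k (t.dropWhile p) := by
      intro k hk
      have hkv : k ≠ v := fun e => (lt_irrefl v (e ▸ hlt k hk)).elim
      have hkt1 : List.count k (t.takeWhile p) = 0 :=
        List.count_eq_zero.2 (fun hmem => hkv (hall k hmem))
      have h0 : List.count k (v :: t) = List.count k t := by simp [Ne.symm hkv]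
      have := hsplitc k
      omega
    -- the distinct values of v :: t are v followed by those of the strictly larger suffix
    have hperm : (PySem.Set.ofList (v :: t) : List Int).Perm
        (v :: (PySem.Set.ofList (t.dropWhile p) : List Int)) := by
      apply (List.perm_ext_iff_of_nodup (PySem.Set.nodup_ofList _) ?_).2
      · intro a
        simp only [PySem.Set.mem_ofList, List.mem_cons]
        constructor
        · rintro (rfl | ha)
          · exact Or.inl rfl
          · rw [← hsplit] at ha
            rcases List.mem_append.1 ha with h1 | h2
            · exact Or.inl (hall a h1)
            · exact Or.inr h2
        · rintro (rfl | ha)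
          · exact Or.inl rfl
          · exact Or.inr (by rw [← hsplit]; exact List.mem_append.2 (Or.inr ha))
      · exact List.nodup_cons.2 ⟨by simpa [PySem.Set.mem_ofList] using hvnot,
          PySem.Set.nodup_ofList _⟩
    have hmapeq : (PySem.Set.ofList (t.dropWhile p) : List Int).map
          (fun k => (k, (List.count k (v :: t) : Int)))
        = (PySem.Set.ofList (t.dropWhile p) : List Int).map
          (fun k => (k, (List.count k (t.dropWhile p) : Int))) := by
      refine List.map_congr_left (fun k hk => ?_)
      rw [hck k (by simpa [PySem.Set.mem_ofList] using hk)]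
    have h3 : (PySem.Set.ofList (v :: t) : List Int).map
          (fun k => (k, (List.count k (v :: t) : Int)))
        |>.Perm ((v, 1 + ((t.takeWhile p).length : Int)) ::
          (PySem.Set.ofList (t.dropWhile p) : List Int).map
            (fun k => (k, (List.count k (t.dropWhile p) : Int)))) := by
      refine (hperm.map _).trans ?_
      rw [List.map_cons, hmapeq]
      have hc : (List.count v (v :: t) : Int) = 1 + ((t.takeWhile p).length : Int) := by
        rw [hcv]; push_cast; ring
      rw [hc]
    exact ((ih ht2).cons _).trans h3.symm


-- the combined sort key is injective on pairs
theorem lexkey_injective : Function.Injective (fun p : Int × Int => toLex (p.2, p.1)) := by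
  intro a b hab
  have h := congrArg ofLex hab
  simp only [ofLex_toLex] at h
  exact Prod.ext (congrArg Prod.snd h) (congrArg Prod.fst h)

-- ===== VERDICT (by name: the statement is the Claim_ definition above) =====
theorem sort_row_spec : Claim_equal_sort_row := by
  intro row _
  unfold Spec_sort_row sort_row sort_row_alt
  set nz := row.filter (fun x => !(x == 0)) with hnz
  set s := PySem.List.sorted nz (fun x => x) with hs
  have hsp : s.Perm nz := PySem.List.sorted_perm nz (fun x => x) false
  have hsorted : s.Pairwise (· ≤ ·) := PySem.List.sorted_pairwise nz (fun x => x)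
  -- A's counting loop is Counter(nz)
  rw [sortRow_counter_eq, PySem.Dict.foldl_insert_getD_add_one_eq_counter,
      PySem.Dict.items_counter]
  -- both flattenings are flatMap over the sorted pair lists
  rw [PySem.List.foldl_append_eq_flatMap (fun p : Int × Int => [p.1, p.2])]
  simp only [List.nil_append]
  -- the two pair lists are permutations, and the lex sort key is injective
  congr 1
  rw [sorted2_eq_sorted_lex, sorted2_eq_sorted_lex]
  apply PySem.List.sorted_eq_sorted_of_perm _ _ _ lexkey_injective
  have hofl : (PySem.Set.ofList nz : List Int).Perm (PySem.Set.ofList s : List Int) := by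
    apply (List.perm_ext_iff_of_nodup (PySem.Set.nodup_ofList _) (PySem.Set.nodup_ofList _)).2
    intro a
    simp only [PySem.Set.mem_ofList]
    exact ⟨fun h => hsp.mem_iff.2 h, fun h => hsp.mem_iff.1 h⟩
  have hmapeq : (PySem.Set.ofList s : List Int).map (fun k => (k, (List.count k nz : Int)))
      = (PySem.Set.ofList s : List Int).map (fun k => (k, (List.count k s : Int))) := by
    refine List.map_congr_left (fun k _ => ?_)
    rw [(hsp.count_eq k)]
  refine (hofl.map _).trans ?_
  rw [hmapeq]
  exact (sortRowRuns_perm s hsorted).symm
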